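-- pv_equiv track=rewrite | github.com/wxl19991003/gan-behavior | experiment/CN1_large.py | getsln1
-- ===== SOURCE A (Python) =====
-- import copy
--
-- def getsln1(trace, eventlist,datatraceindex):
--     sln = []
--     length = len(trace)
--     tag=0
--     l1 = []
--     for j in range(len(eventlist)):
--         l1.append(0)
--     for i in range(length+1):
--         if i != datatraceindex:
--             line = []
--             for j in range(len(eventlist)):
--                 line.append(0)
--             l = trace[:i + 1]
--             for e in eventlist:
--                 line[eventlist.index(e)] = l.count(e)
--             sln.append(line)
--         else:
--             if datatraceindex !=0:
--                 h=copy.deepcopy(sln[i-1])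
--                 sln.append(h)
--             else:
--                 sln.append(l1)
--             tag=1
--     l = []
--     for j in range(len(eventlist)):
--         l.append(0)
--     for i in range(35-len(trace)-1):
--         sln.append(l)
--     return sln
-- ===== SOURCE B (Python) =====
-- def getsln1(trace, eventlist, datatraceindex):
--     # One pass: running prefix counts + first-index map (counts land at the
--     # first occurrence of each event in eventlist, duplicates stay 0).
--     m = len(eventlist)
--     n = len(trace)
--     first = {}
--     for k, e in enumerate(eventlist):
--         first.setdefault(e, k)
--     cnt = [0] * m
--     sln = []
--     for i in range(n + 1):
--         if i == datatraceindex: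
--             # row at the masked position repeats the previous prefix row
--             # (the zero row when datatraceindex == 0)
--             sln.append(cnt[:])
--             if i < n:
--                 k = first.get(trace[i])
--                 if k is not None:
--                     cnt[k] += 1
--         else:
--             if i < n:
--                 k = first.get(trace[i])
--                 if k is not None:
--                     cnt[k] += 1
--             sln.append(cnt[:])
--     zeros = [0] * m
--     for _ in range(34 - n):
--         sln.append(zeros[:])
--     return sln
-- ===== Notes on version B (the rewrite author's own statement) =====
-- stated objective: faster
-- what changed: A recounts every event over the whole prefix trace[:i+1] at every position (and calls eventlist.index inside the inner loop); B keeps one running count vector, updated per position through a first-index map of eventlist built once, so each output row is a copy of the running counts.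
import Mathlib
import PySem

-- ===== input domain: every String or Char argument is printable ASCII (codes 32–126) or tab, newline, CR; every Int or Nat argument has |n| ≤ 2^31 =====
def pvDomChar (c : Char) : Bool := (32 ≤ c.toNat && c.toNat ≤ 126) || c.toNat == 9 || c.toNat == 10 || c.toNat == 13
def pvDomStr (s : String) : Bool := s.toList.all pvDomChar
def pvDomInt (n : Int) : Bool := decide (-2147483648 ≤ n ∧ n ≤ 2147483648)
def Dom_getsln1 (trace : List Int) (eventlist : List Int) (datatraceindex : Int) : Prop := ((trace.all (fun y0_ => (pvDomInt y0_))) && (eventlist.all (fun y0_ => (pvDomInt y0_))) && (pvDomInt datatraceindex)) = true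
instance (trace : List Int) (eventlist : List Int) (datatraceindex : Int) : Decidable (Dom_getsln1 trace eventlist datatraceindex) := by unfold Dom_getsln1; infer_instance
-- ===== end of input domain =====

-- B replaces A's per-position recount of every event with one running prefix-count
-- vector updated through a first-index map of eventlist; same return value.

-- ===== PORT A =====
def getsln1 (trace : List Int) (eventlist : List Int) (datatraceindex : Int) : List (List Int) :=
  let length : Int := trace.length
  let l1 : List Int :=
    (PySem.List.pyRange 0 (eventlist.length : Int) 1).foldl (fun acc _ => acc ++ [(0 : Int)]) []
  let sln :=
    (PySem.List.pyRange 0 (length + 1) 1).foldl (fun sln i =>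
      if i ≠ datatraceindex then
        let line0 : List Int :=
          (PySem.List.pyRange 0 (eventlist.length : Int) 1).foldl (fun acc _ => acc ++ [(0 : Int)]) []
        let l := PySem.List.slice trace none (some (i + 1))
        let line := eventlist.foldl (fun row e =>
          match PySem.List.index? eventlist e with
          | some k => row.set k ((PySem.List.count l e : Nat) : Int)
          | none => row  -- unreachable: e is drawn from eventlist
          ) line0
        sln ++ [line]
      else
        if datatraceindex ≠ 0 then
          sln ++ [(PySem.List.pyGet? sln (i - 1)).getD []]  -- in range: here 1 ≤ i
        else
          sln ++ [l1]) []
  let l : List Int :=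
    (PySem.List.pyRange 0 (eventlist.length : Int) 1).foldl (fun acc _ => acc ++ [(0 : Int)]) []
  (PySem.List.pyRange 0 (35 - length - 1) 1).foldl (fun s _ => s ++ [l]) sln

-- ===== PORT B =====
-- cnt[k] += 1 at k = first.get(x), when x is a key of first
def pvBump (first : PySem.Dict Int Int) (cnt : List Int) (x : Int) : List Int :=
  match first.get? x with
  | some k => PySem.List.pySetD cnt k (PySem.List.pyGetD cnt k 0 + 1)
  | none => cnt

def getsln1_alt (trace : List Int) (eventlist : List Int) (datatraceindex : Int) : List (List Int) :=
  let m := eventlist.length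
  let n := trace.length
  let first : PySem.Dict Int Int :=
    (PySem.List.enumerate eventlist 0).foldl (fun d p => d.setdefault p.2 p.1) PySem.Dict.empty
  let st :=
    (PySem.List.pyRange 0 ((n : Int) + 1) 1).foldl
      (fun (st : List Int × List (List Int)) i =>
        let cnt := st.1
        let sln := st.2
        if i = datatraceindex then
          let sln := sln ++ [cnt]
          let cnt := if i < (n : Int) then pvBump first cnt (PySem.List.pyGetD trace i 0) else cnt
          (cnt, sln)
        else
          let cnt := if i < (n : Int) then pvBump first cnt (PySem.List.pyGetD trace i 0) else cnt
          (cnt, sln ++ [cnt]))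
      (List.replicate m (0 : Int), [])
  let zeros : List Int := List.replicate m (0 : Int)
  (PySem.List.pyRange 0 (34 - (n : Int)) 1).foldl (fun s _ => s ++ [zeros]) st.2

-- ===== PRECONDITION & SPEC =====
def Spec_getsln1 (trace : List Int) (eventlist : List Int) (datatraceindex : Int) (out : List (List Int)) : Prop := out = getsln1_alt trace eventlist datatraceindex
instance (trace : List Int) (eventlist : List Int) (datatraceindex : Int) (out : List (List Int)) : Decidable (Spec_getsln1 trace eventlist datatraceindex out) := by unfold Spec_getsln1; infer_instance

-- ===== CLAIM (what is proved, stated in full; the proofs are below) =====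
def Claim_equal_getsln1 : Prop := ∀ (trace : List Int) (eventlist : List Int) (datatraceindex : Int), Dom_getsln1 trace eventlist datatraceindex → Spec_getsln1 trace eventlist datatraceindex (getsln1 trace eventlist datatraceindex)

-- ===== LEMMAS AND PROOFS =====

-- the common row value: position k holds (prefix p).count el[k] when k is the
-- first index of el[k] in el, and 0 otherwise
def pvRow (el p : List Int) : List Int :=
  el.zipIdx.map (fun q => if PySem.List.index? el q.1 = some q.2 then ((PySem.List.count p q.1 : Nat) : Int) else 0)

-- the row carried at position i of the output
def pvOut (el t : List Int) (dti : Int) (i : Nat) : List Int :=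
  if (i : Int) = dti then pvRow el (t.take i) else pvRow el (t.take (i + 1))

theorem pvRow_nil (el : List Int) : pvRow el [] = List.replicate el.length 0 := by
  simp [pvRow]

theorem pvRow_getElem? (el p : List Int) (j : Nat) :
    (pvRow el p)[j]? = el[j]?.map (fun e =>
      if PySem.List.index? el e = some j then ((PySem.List.count p e : Nat) : Int) else 0) := by
  simp [pvRow, List.getElem?_zipIdx]
  cases el[j]? <;> simp

theorem pvZeros (m : Nat) :
    (PySem.List.pyRange 0 (m : Int) 1).foldl (fun acc _ => acc ++ [(0 : Int)]) [] =
      List.replicate m (0 : Int) := by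
  rw [PySem.List.foldl_append_singleton_eq_map]
  simp [List.map_const', PySem.List.length_pyRange_one]

-- B's first-index dict: lookup is list.index
theorem pvFirst_get (el : List Int) : ∀ (x : Int),
    ((PySem.List.enumerate el 0).foldl (fun d p => d.setdefault p.2 p.1) PySem.Dict.empty).get? x
      = (PySem.List.index? el x).map (fun k => (k : Int)) := by
  induction el using List.reverseRecOn with
  | nil => intro x; simp [PySem.List.enumerate]
  | append_singleton l e ih =>
    intro x
    rw [PySem.List.enumerate_append]
    simp only [List.foldl_append, PySem.List.enumerate, List.foldl_cons, List.foldl_nil]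
    set d := (PySem.List.enumerate l 0).foldl (fun d p => d.setdefault p.2 p.1) PySem.Dict.empty with hd
    have hcon : d.contains e = ((PySem.List.index? l e).isSome) := by
      rw [PySem.Dict.contains_eq_isSome_get?, ih e]; cases PySem.List.index? l e <;> simp
    by_cases hmem : e ∈ l
    · have hc : d.contains e = true := by
        rw [hcon]; exact (PySem.List.index?_isSome_iff l e).2 hmem
      rw [PySem.Dict.setdefault_of_contains d _ hc, ih x]
      congr 1
      by_cases hxm : x ∈ l
      · rw [PySem.List.index?_append_of_mem [e] hxm]
      · have hxe : x ≠ e := fun h => hxm (h ▸ hmem)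
        rw [(PySem.List.index?_eq_none_iff l x).2 hxm,
          (PySem.List.index?_eq_none_iff (l ++ [e]) x).2 (by simp [hxm, hxe])]
    · have hc : d.contains e = false := by
        rw [hcon]
        cases h : PySem.List.index? l e with
        | none => simp
        | some k => exact absurd ((PySem.List.index?_isSome_iff l e).1 (by rw [h]; rfl)) hmem
      rw [PySem.Dict.setdefault_of_not_contains d _ hc]
      by_cases hx : x = e
      · subst hx
        rw [PySem.Dict.get?_insert_self, PySem.List.index?_append_singleton_self l x hmem]
        simp
      · rw [PySem.Dict.get?_insert_of_ne d _ hx, ih x]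
        congr 1
        by_cases hxm : x ∈ l
        · rw [PySem.List.index?_append_of_mem [e] hxm]
        · rw [(PySem.List.index?_eq_none_iff l x).2 hxm,
            (PySem.List.index?_eq_none_iff (l ++ [e]) x).2 (by simp [hxm, hx])]

-- appending x to the prefix bumps the row at x's first index
theorem pvRow_append (el p : List Int) (x : Int) :
    pvRow el (p ++ [x]) =
      (match PySem.List.index? el x with
       | some k => (pvRow el p).set k ((pvRow el p).getD k 0 + 1)
       | none => pvRow el p) := by
  cases h : PySem.List.index? el x with
  | none =>
    have hx : x ∉ el := (PySem.List.index?_eq_none_iff el x).1 h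
    apply List.ext_getElem?
    intro j
    rw [pvRow_getElem?, pvRow_getElem?]
    cases hj : el[j]? with
    | none => simp
    | some e =>
      have he : e ∈ el := List.mem_of_getElem? hj
      have hne : ¬ (x = e) := fun hh => hx (hh ▸ he)
      simp only [Option.map_some]
      congr 1
      split
      · simp [PySem.List.count_eq, List.count_append, hne]
      · rfl
  | some k0 =>
    obtain ⟨hk0, hx, -⟩ := PySem.List.getElem_of_index?_eq_some h
    have hgetD : (pvRow el p).getD k0 0 = ((PySem.List.count p x : Nat) : Int) := by
      have hlen : k0 < (pvRow el p).length := by simpa [pvRow] using hk0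
      have h2 := pvRow_getElem? el p k0
      rw [List.getElem?_eq_getElem hk0, hx] at h2
      rw [List.getD_eq_getElem _ _ hlen, ← Option.some_inj, ← List.getElem?_eq_getElem hlen, h2]
      simp only [Option.map_some]
      rw [if_pos h]
    apply List.ext_getElem?
    intro j
    rw [pvRow_getElem?, List.getElem?_set]
    by_cases hj0 : k0 = j
    · subst hj0
      rw [List.getElem?_eq_getElem hk0, hx]
      simp only [Option.map_some]
      rw [if_pos h]
      have hlen' : k0 < (pvRow el p).length := by simpa [pvRow] using hk0
      have hcnt : PySem.List.count (p ++ [x]) x = PySem.List.count p x + 1 := by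
        simp [PySem.List.count_eq, List.count_append]
      rw [List.getD_eq_getElem _ _ hlen'] at hgetD
      rw [if_pos trivial, if_pos hlen', List.getD_eq_getElem _ _ hlen', hgetD, hcnt]
      simp
    · rw [if_neg hj0, pvRow_getElem?]
      cases hj : el[j]? with
      | none => simp
      | some e =>
        simp only [Option.map_some]
        congr 1
        by_cases hc : PySem.List.index? el e = some j
        · have hne : ¬ (x = e) := by
            intro hh; subst hh; rw [h] at hc; exact hj0 (by injection hc)
          rw [if_pos hc, if_pos hc]
          simp [PySem.List.count_eq, List.count_append, hne]
        · rw [if_neg hc, if_neg hc]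

-- bumping through B's dict advances the row by one prefix element
theorem pvBump_row (el p : List Int) (x : Int) :
    pvBump ((PySem.List.enumerate el 0).foldl (fun d p => d.setdefault p.2 p.1) PySem.Dict.empty)
      (pvRow el p) x = pvRow el (p ++ [x]) := by
  rw [pvRow_append]
  unfold pvBump
  rw [pvFirst_get el x]
  cases h : PySem.List.index? el x with
  | none => simp
  | some k => simp [PySem.List.pySetD_natCast, PySem.List.pyGetD_natCast]

theorem pvInnerA_gen (el p : List Int) : ∀ (es row : List Int), (∀ e ∈ es, e ∈ el) →
    ∀ (k : Nat),
    (es.foldl (fun row e =>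
        match PySem.List.index? el e with
        | some k => row.set k ((PySem.List.count p e : Nat) : Int)
        | none => row) row)[k]? =
      if PySem.List.index? el (el.getD k 0) = some k ∧ el.getD k 0 ∈ es ∧ k < row.length then
        some ((PySem.List.count p (el.getD k 0) : Nat) : Int)
      else (row[k]?) := by
  intro es
  induction es with
  | nil => intro row _ k; simp
  | cons e rest ih =>
    intro row hsub k
    simp only [List.foldl_cons]
    have hel : e ∈ el := hsub e (List.mem_cons_self)
    obtain ⟨k0, hk0⟩ : ∃ k0, PySem.List.index? el e = some k0 := by
      cases h : PySem.List.index? el e with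
      | none => exact absurd ((PySem.List.index?_eq_none_iff el e).1 h) (by simp [hel])
      | some k0 => exact ⟨k0, rfl⟩
    obtain ⟨hk0lt, hk0e, -⟩ := PySem.List.getElem_of_index?_eq_some hk0
    rw [hk0]
    rw [ih (row.set k0 ((PySem.List.count p e : Nat) : Int)) (fun e' he' => hsub e' (List.mem_cons_of_mem _ he')) k]
    simp only [List.length_set]
    by_cases hcond : PySem.List.index? el (el.getD k 0) = some k ∧ el.getD k 0 ∈ rest ∧ k < row.length
    · rw [if_pos hcond, if_pos ⟨hcond.1, List.mem_cons_of_mem _ hcond.2.1, hcond.2.2⟩]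
    · rw [if_neg hcond, List.getElem?_set]
      by_cases hkk : k0 = k
      · subst hkk
        have hgd : el.getD k0 0 = e := by rw [List.getD_eq_getElem _ _ hk0lt, hk0e]
        by_cases hlt : k0 < row.length
        · rw [if_pos rfl, if_pos hlt, if_pos ⟨by rw [hgd]; exact hk0, by rw [hgd]; exact List.mem_cons_self, hlt⟩, hgd]
        · rw [if_pos rfl, if_neg hlt, if_neg (fun hc => hlt hc.2.2), List.getElem?_eq_none (by omega)]
      · rw [if_neg hkk]
        rw [if_neg]
        intro hc
        apply hcond
        refine ⟨hc.1, ?_, hc.2.2⟩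
        rcases List.mem_cons.1 hc.2.1 with hce | hcr
        · exfalso; apply hkk
          rw [hce] at hc
          rw [hk0] at hc
          exact (Option.some_inj.1 hc.1)
        · exact hcr

-- A's inner loop computes the common row value
theorem pvInnerA (el p : List Int) :
    el.foldl (fun row e =>
        match PySem.List.index? el e with
        | some k => row.set k ((PySem.List.count p e : Nat) : Int)
        | none => row) (List.replicate el.length 0) = pvRow el p := by
  apply List.ext_getElem?
  intro j
  rw [pvInnerA_gen el p el _ (fun _ h => h) j, pvRow_getElem?]
  by_cases hj : j < el.length
  · have hgd : el.getD j 0 = el[j] := List.getD_eq_getElem _ _ hj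
    rw [List.getElem?_eq_getElem hj]
    simp only [Option.map_some, List.length_replicate, hgd]
    by_cases hc : PySem.List.index? el el[j] = some j
    · rw [if_pos ⟨hc, List.getElem_mem hj, hj⟩, if_pos hc]
    · rw [if_neg (fun h => hc h.1), if_neg hc, List.getElem?_replicate, if_pos hj]
  · rw [if_neg, List.getElem?_eq_none (by simpa using hj), List.getElem?_eq_none (by omega)]
    · simp
    · intro hc
      obtain ⟨hlt, -, -⟩ := PySem.List.getElem_of_index?_eq_some hc.1
      omega

-- A's outer loop builds the pvOut rows
theorem pvOuterA (el t : List Int) (dti : Int) (j : Nat) (hj : j ≤ t.length + 1) :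
    (PySem.List.pyRange 0 (j : Int) 1).foldl (fun sln i =>
      if i ≠ dti then
        let line0 : List Int :=
          (PySem.List.pyRange 0 (el.length : Int) 1).foldl (fun acc _ => acc ++ [(0 : Int)]) []
        let l := PySem.List.slice t none (some (i + 1))
        let line := el.foldl (fun row e =>
          match PySem.List.index? el e with
          | some k => row.set k ((PySem.List.count l e : Nat) : Int)
          | none => row) line0
        sln ++ [line]
      else
        if dti ≠ 0 then
          sln ++ [(PySem.List.pyGet? sln (i - 1)).getD []]
        else
          sln ++ [(PySem.List.pyRange 0 (el.length : Int) 1).foldl (fun acc _ => acc ++ [(0 : Int)]) []]) []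
    = (List.range j).map (pvOut el t dti) := by
  induction j with
  | zero => simp [PySem.List.pyRange_one_eq_nil]
  | succ j ih =>
    have hj' : j ≤ t.length + 1 := by omega
    rw [show ((j + 1 : Nat) : Int) = (j : Int) + 1 by push_cast; ring,
      PySem.List.pyRange_one_succ_right (by positivity), List.foldl_append, ih hj']
    simp only [List.foldl_cons, List.foldl_nil]
    rw [List.range_succ, List.map_append, List.map_singleton]
    by_cases hne : (j : Int) ≠ dti
    · rw [if_pos hne]
      have hslice : PySem.List.slice t none (some ((j : Int) + 1)) = t.take (j + 1) := by
        rw [PySem.List.slice_to t (b := (j : Int) + 1) (by omega)]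
        congr 1
      rw [hslice, pvZeros, pvInnerA]
      have : pvOut el t dti j = pvRow el (t.take (j + 1)) := by
        rw [pvOut, if_neg hne]
      rw [this]
    · rw [if_neg hne]
      rw [not_not] at hne
      by_cases h0 : dti ≠ 0
      · rw [if_pos h0]
        have hj1 : 1 ≤ j := by
          by_contra hlt
          have : j = 0 := by omega
          subst this
          exact h0 (by simpa using hne.symm)
        have hcast : (j : Int) - 1 = ((j - 1 : Nat) : Int) := by omega
        rw [hcast, PySem.List.pyGet?_natCast]
        have hlt : j - 1 < ((List.range j).map (pvOut el t dti)).length := by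
          simp; omega
        rw [List.getElem?_eq_getElem hlt]
        simp only [Option.getD_some]
        rw [List.getElem_map, List.getElem_range]
        have hne' : ((j - 1 : Nat) : Int) ≠ dti := by omega
        rw [show pvOut el t dti (j - 1) = pvRow el (t.take (j - 1 + 1)) from by rw [pvOut, if_neg hne'],
          show pvOut el t dti j = pvRow el (t.take j) from by rw [pvOut, if_pos hne],
          show j - 1 + 1 = j by omega]
      · rw [not_not] at h0
        rw [if_neg (by simp [h0])]
        have hj0 : j = 0 := by omega
        subst hj0
        rw [pvZeros, show pvOut el t dti 0 = pvRow el (t.take 0) from by rw [pvOut, if_pos hne],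
          List.take_zero, pvRow_nil]

-- B's loop invariant: running counts and the rows emitted so far
theorem pvOuterB (el t : List Int) (dti : Int) (j : Nat) (hj : j ≤ t.length + 1) :
    (PySem.List.pyRange 0 ((j : Nat) : Int) 1).foldl
      (fun (st : List Int × List (List Int)) i =>
        let cnt := st.1
        let sln := st.2
        if i = dti then
          let sln := sln ++ [cnt]
          let cnt := if i < (t.length : Int) then
            pvBump ((PySem.List.enumerate el 0).foldl (fun d p => d.setdefault p.2 p.1) PySem.Dict.empty)
              cnt (PySem.List.pyGetD t i 0) else cnt
          (cnt, sln)
        else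
          let cnt := if i < (t.length : Int) then
            pvBump ((PySem.List.enumerate el 0).foldl (fun d p => d.setdefault p.2 p.1) PySem.Dict.empty)
              cnt (PySem.List.pyGetD t i 0) else cnt
          (cnt, sln ++ [cnt]))
      (List.replicate el.length (0 : Int), [])
    = (pvRow el (t.take j), (List.range j).map (pvOut el t dti)) := by
  induction j with
  | zero => simp [PySem.List.pyRange_one_eq_nil, pvRow_nil]
  | succ j ih =>
    have hj' : j ≤ t.length + 1 := by omega
    rw [show ((j + 1 : Nat) : Int) = (j : Int) + 1 by push_cast; ring,
      PySem.List.pyRange_one_succ_right (by positivity), List.foldl_append, ih hj']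
    simp only [List.foldl_cons, List.foldl_nil]
    rw [List.range_succ, List.map_append, List.map_singleton]
    have hcnt : (if (j : Int) < (t.length : Int) then
        pvBump ((PySem.List.enumerate el 0).foldl (fun d p => d.setdefault p.2 p.1) PySem.Dict.empty)
          (pvRow el (t.take j)) (PySem.List.pyGetD t (j : Int) 0)
        else pvRow el (t.take j)) = pvRow el (t.take (j + 1)) := by
      by_cases hlt : j < t.length
      · rw [if_pos (by exact_mod_cast hlt), PySem.List.pyGetD_natCast,
          List.getD_eq_getElem _ _ hlt, pvBump_row,
          ← List.take_concat_get' t j hlt]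
      · rw [if_neg (by omega), List.take_of_length_le (by omega), List.take_of_length_le (by omega)]
    by_cases he : (j : Int) = dti
    · rw [if_pos he]
      rw [hcnt, show pvOut el t dti j = pvRow el (t.take j) from by rw [pvOut, if_pos he]]
    · rw [if_neg he]
      rw [hcnt, show pvOut el t dti j = pvRow el (t.take (j + 1)) from by rw [pvOut, if_neg he]]

theorem getsln1_eq (trace eventlist : List Int) (dti : Int) :
    getsln1 trace eventlist dti = getsln1_alt trace eventlist dti := by
  unfold getsln1 getsln1_alt
  simp only
  rw [show ((trace.length : Int) + 1) = ((trace.length + 1 : Nat) : Int) by push_cast; ring]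
  rw [pvOuterA eventlist trace dti (trace.length + 1) (by omega),
    pvOuterB eventlist trace dti (trace.length + 1) (by omega)]
  rw [pvZeros, show (35 - (trace.length : Int) - 1) = 34 - (trace.length : Int) by ring]

-- ===== VERDICT (by name: the statement is the Claim_ definition above) =====
theorem getsln1_spec : Claim_equal_getsln1 := by
  intro trace eventlist dti _
  exact getsln1_eq trace eventlist dti
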